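-- pv_equiv track=rewrite | github.com/aichingert/aoc | 2016/python/07.py | contains_ssl
-- ===== SOURCE A (Python) =====
-- def contains_ssl(addr, hypr):
--     for i in range(len(addr)):
--         for j in range(len(addr[i])-2):
--             if addr[i][j] == addr[i][j+1]:
--                 continue
--             if addr[i][j] == addr[i][j+2]:
--                 for hyp in hypr:
--                     for k in range(len(hyp)-2):
--                         if hyp[k] == hyp[k+2] and hyp[k] == addr[i][j+1] and hyp[k+1] == addr[i][j]:
--                             return True
--     return False
-- ===== SOURCE B (Python) =====
-- def contains_ssl(addr, hypr):
--     abas = set()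
--     for s in addr:
--         for j in range(len(s) - 2):
--             if s[j] == s[j + 2] and s[j] != s[j + 1]:
--                 abas.add((s[j], s[j + 1]))
--     babs = set()
--     for h in hypr:
--         for k in range(len(h) - 2):
--             if h[k] == h[k + 2]:
--                 babs.add((h[k + 1], h[k]))
--     return not abas.isdisjoint(babs)
-- ===== Notes on version B (the rewrite author's own statement) =====
-- stated objective: alternative
-- what changed: Replaced A's nested scan (for every ABA window rescan every hypernet window) by two independent passes that collect the ABA pairs and the BAB-implied pairs into sets and test the sets for a common element.
import Mathlib
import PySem

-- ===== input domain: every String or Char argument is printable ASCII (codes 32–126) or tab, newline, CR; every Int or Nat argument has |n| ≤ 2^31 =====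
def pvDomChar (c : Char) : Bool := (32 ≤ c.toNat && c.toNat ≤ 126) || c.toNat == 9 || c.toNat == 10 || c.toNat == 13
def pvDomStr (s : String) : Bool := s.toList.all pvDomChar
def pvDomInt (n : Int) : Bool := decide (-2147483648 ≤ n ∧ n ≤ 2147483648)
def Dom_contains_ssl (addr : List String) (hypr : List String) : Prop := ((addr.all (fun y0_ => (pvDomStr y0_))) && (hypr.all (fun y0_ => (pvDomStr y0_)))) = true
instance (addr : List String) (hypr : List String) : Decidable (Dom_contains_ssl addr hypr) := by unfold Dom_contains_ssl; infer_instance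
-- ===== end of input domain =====

-- B builds the ABA-pair and BAB-pair sets in two independent passes and tests them for a common element (alternative algorithm; A instead rescans every hypernet window for each ABA window, with early exit).
-- ===== PORT A =====
-- Indexing: every index below is generated in range by its range-loop, so List.getD is exact for Python's s[j].
def contains_ssl (addr : List String) (hypr : List String) : Bool :=
  addr.any (fun s =>
    (List.range (s.toList.length - 2)).any (fun j =>
      let cs := s.toList
      if cs.getD j ' ' == cs.getD (j+1) ' ' then false
      else if cs.getD j ' ' == cs.getD (j+2) ' ' then
        hypr.any (fun h =>
          (List.range (h.toList.length - 2)).any (fun k =>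
            let hs := h.toList
            hs.getD k ' ' == hs.getD (k+2) ' ' && hs.getD k ' ' == cs.getD (j+1) ' ' && hs.getD (k+1) ' ' == cs.getD j ' '))
      else false))

-- ===== PORT B =====
def pvAbas (addr : List String) : PySem.Set (Char × Char) :=
  PySem.Set.ofList (addr.flatMap (fun s =>
    (List.range (s.toList.length - 2)).filterMap (fun j =>
      let cs := s.toList
      if cs.getD j ' ' == cs.getD (j+2) ' ' && !(cs.getD j ' ' == cs.getD (j+1) ' ') then
        some (cs.getD j ' ', cs.getD (j+1) ' ') else none)))

def pvBabs (hypr : List String) : PySem.Set (Char × Char) :=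
  PySem.Set.ofList (hypr.flatMap (fun h =>
    (List.range (h.toList.length - 2)).filterMap (fun k =>
      let hs := h.toList
      if hs.getD k ' ' == hs.getD (k+2) ' ' then some (hs.getD (k+1) ' ', hs.getD k ' ') else none)))

def contains_ssl_alt (addr : List String) (hypr : List String) : Bool :=
  !(PySem.Set.isdisjoint (pvAbas addr) (pvBabs hypr))

-- ===== PRECONDITION & SPEC =====
def Spec_contains_ssl (addr : List String) (hypr : List String) (out : Bool) : Prop := out = contains_ssl_alt addr hypr
instance (addr : List String) (hypr : List String) (out : Bool) : Decidable (Spec_contains_ssl addr hypr out) := by unfold Spec_contains_ssl; infer_instance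

-- ===== CLAIM (what is proved, stated in full; the proofs are below) =====
def Claim_equal_contains_ssl : Prop := ∀ (addr : List String) (hypr : List String), Dom_contains_ssl addr hypr → Spec_contains_ssl addr hypr (contains_ssl addr hypr)

-- ===== LEMMAS AND PROOFS =====

-- ===== VERDICT (by name: the statement is the Claim_ definition above) =====
theorem contains_ssl_spec : Claim_equal_contains_ssl := by
  intro addr hypr _
  unfold Spec_contains_ssl
  rw [Bool.eq_iff_iff]
  have hB : contains_ssl_alt addr hypr = true ↔ ∃ x ∈ pvAbas addr, x ∈ pvBabs hypr := by
    simp only [contains_ssl_alt, Bool.not_eq_true', Bool.eq_false_iff, ne_eq,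
      PySem.Set.isdisjoint_iff]
    push Not
    rfl
  rw [hB]
  constructor
  · intro hfound
    simp only [contains_ssl, List.any_eq_true, List.mem_range] at hfound
    obtain ⟨s, hs, j, hj, hc⟩ := hfound
    split_ifs at hc with h1 h2
    · simp only [List.any_eq_true, List.mem_range, Bool.and_eq_true, beq_iff_eq] at hc
      obtain ⟨h, hh, k, hk, ⟨e1, e2⟩, e3⟩ := hc
      refine ⟨(s.toList.getD j ' ', s.toList.getD (j+1) ' '), ?_, ?_⟩
      · simp only [pvAbas, PySem.Set.mem_ofList, List.mem_flatMap, List.mem_filterMap,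
          List.mem_range]
        refine ⟨s, hs, j, hj, ?_⟩
        rw [if_pos (by rw [Bool.and_eq_true, Bool.not_eq_true']; exact ⟨h2, Bool.eq_false_iff.mpr h1⟩)]
      · simp only [pvBabs, PySem.Set.mem_ofList, List.mem_flatMap, List.mem_filterMap,
          List.mem_range]
        refine ⟨h, hh, k, hk, ?_⟩
        rw [if_pos (beq_iff_eq.mpr e1), e2, e3]
  · rintro ⟨x, hxa, hxb⟩
    simp only [pvAbas, PySem.Set.mem_ofList, List.mem_flatMap, List.mem_filterMap,
      List.mem_range] at hxa
    simp only [pvBabs, PySem.Set.mem_ofList, List.mem_flatMap, List.mem_filterMap,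
      List.mem_range] at hxb
    obtain ⟨s, hs, j, hj, hif⟩ := hxa
    obtain ⟨h, hh, k, hk, hif2⟩ := hxb
    by_cases c1 : (s.toList.getD j ' ' == s.toList.getD (j+2) ' '
        && !(s.toList.getD j ' ' == s.toList.getD (j+1) ' ')) = true
    swap
    · rw [if_neg c1] at hif; exact absurd hif (by simp)
    by_cases c2 : (h.toList.getD k ' ' == h.toList.getD (k+2) ' ') = true
    swap
    · rw [if_neg c2] at hif2; exact absurd hif2 (by simp)
    rw [if_pos c1] at hif
    rw [if_pos c2] at hif2
    have hxy : (s.toList.getD j ' ', s.toList.getD (j+1) ' ')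
        = (h.toList.getD (k+1) ' ', h.toList.getD k ' ') :=
      (Option.some.inj hif).trans (Option.some.inj hif2).symm
    rw [Bool.and_eq_true, Bool.not_eq_true'] at c1
    simp only [contains_ssl, List.any_eq_true, List.mem_range]
    refine ⟨s, hs, j, hj, ?_⟩
    rw [if_neg (by rw [c1.2]; simp), if_pos c1.1]
    simp only [List.any_eq_true, List.mem_range, Bool.and_eq_true, beq_iff_eq]
    refine ⟨h, hh, k, hk, ⟨beq_iff_eq.mp c2, ?_⟩, ?_⟩
    · exact (congrArg Prod.snd hxy).symm
    · exact (congrArg Prod.fst hxy).symm
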